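-- pv_equiv track=rewrite | github.com/taewookimmr/Programmers-Problems | etc/overtimeindex.py | solution
-- ===== SOURCE A (Python) =====
-- def solution(n, works):
--     if sum(works) <=n :
--         return 0
--
--     m = len(works)
--     queue = [[]]
--     answer =[]
--
--     while len(queue):
--         if len(queue[0]) == m:
--             plan = queue.pop(0)
--             if sum(plan) == n:
--                 x=sum( [ (a-b)**2 for a,b in zip(works, plan)])
--                 answer.append(x)
--         else :
--             plan_precursor = queue.pop(0)
--             pidx = len(plan_precursor)
--             left = n-sum(plan_precursor)
--             if pidx==m-1:
--                 if left <= works[pidx]: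
--                     queue.append(plan_precursor[:]+[left])
--             else:
--                 for i in range(0, works[pidx]+1):
--                     if i <=left:
--                         queue.append(plan_precursor[:]+[i])
--
--     return min(answer)
-- ===== SOURCE B (Python) =====
-- def solution(n, works):
--     # Depth-first branch enumeration with running minimum (no BFS queue of plans).
--     if sum(works) <= n:
--         return 0
--
--     def best(ws, left):
--         # minimal sum of squared reductions assigning `left` hours over suffix `ws`
--         if len(ws) == 1:
--             return (ws[0] - left) ** 2 if left <= ws[0] else None
--         res = None
--         for p in range(0, min(ws[0], left) + 1):
--             sub = best(ws[1:], left - p)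
--             if sub is not None:
--                 cand = (ws[0] - p) ** 2 + sub
--                 if res is None or cand < res:
--                     res = cand
--         return res
--
--     return best(works, n)
-- ===== Notes on version B (the rewrite author's own statement) =====
-- stated objective: alternative
-- what changed: Replaces A's breadth-first FIFO queue that materialises every partial plan (with O(queue) pop(0) and per-step prefix copies) by a depth-first recursion over the work-list suffix that keeps only a running minimum and caps each branch at min(work, remaining).
import Mathlib
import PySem

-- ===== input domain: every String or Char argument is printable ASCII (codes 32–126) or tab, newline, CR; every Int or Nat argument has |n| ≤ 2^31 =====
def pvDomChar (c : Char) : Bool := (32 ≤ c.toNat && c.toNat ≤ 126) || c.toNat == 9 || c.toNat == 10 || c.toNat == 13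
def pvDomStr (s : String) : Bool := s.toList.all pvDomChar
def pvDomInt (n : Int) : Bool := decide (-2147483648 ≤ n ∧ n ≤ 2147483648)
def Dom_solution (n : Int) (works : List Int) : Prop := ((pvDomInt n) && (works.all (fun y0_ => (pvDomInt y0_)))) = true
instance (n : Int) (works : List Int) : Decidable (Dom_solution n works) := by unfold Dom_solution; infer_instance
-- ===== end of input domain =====

-- B replaces A's breadth-first queue of partial plans by a depth-first recursion over the
-- work-list suffix that keeps only a running minimum (same return value on Pre_solution).

-- ===== PORT A =====
-- x = sum([(a-b)**2 for a,b in zip(works, plan)])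
def pvCost (works plan : List Int) : Int :=
  ((works.zip plan).map (fun ab => (ab.1 - ab.2) ^ 2)).sum

-- loop bound for A's while-loop: a base exceeding every branching factor works[pidx]+1;
-- pvW works ^ (len works + 1) bounds the number of iterations (proved in loopA_perm below)
def pvW (works : List Int) : Nat :=
  works.foldr (fun w acc => max (w + 2).toNat acc) 2

-- the while-loop: FIFO queue of partial plans; the fuel argument only makes the loop total
-- (it never runs out when called from `solution`)
def loopA (n : Int) (works : List Int) : Nat → List (List Int) → List Int → List Int
  | _, [], answer => answer
  | 0, _ :: _, answer => answer   -- fuel exhausted: unreachable from `solution`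
  | fuel + 1, e :: rest, answer =>
    if e.length = works.length then
      -- plan complete: keep its cost if it spends exactly n
      if e.sum = n then loopA n works fuel rest (answer ++ [pvCost works e])
      else loopA n works fuel rest answer
    else
      if e.length = works.length - 1 then
        -- last position: forced value left = n - sum(plan_precursor)
        if n - e.sum ≤ works.getD e.length 0 then
          loopA n works fuel (rest ++ [e ++ [n - e.sum]]) answer
        else loopA n works fuel rest answer
      else
        -- for i in range(0, works[pidx]+1): if i <= left: queue.append(precursor+[i])
        loopA n works fuel
          (rest ++ ((PySem.List.pyRange 0 (works.getD e.length 0 + 1) 1).filter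
              (fun i => i ≤ n - e.sum)).map (fun i => e ++ [i])) answer
  termination_by structural fuel _ _ => fuel

def solution (n : Int) (works : List Int) : Int :=
  if works.sum ≤ n then 0
  else
    -- Python: min(answer); min([]) raises ValueError — those inputs are excluded by Pre_solution
    (PySem.List.min? (loopA n works (pvW works ^ (works.length + 1)) [[]] [])
      (fun y => y)).getD 0

-- ===== PORT B =====
-- best(ws, left): minimal sum of squared reductions spending `left` over the suffix `ws`
def bestB : List Int → Int → Option Int
  | [], _ => none          -- Python B raises IndexError here; unreachable under Pre_solution
  | [w], left => if left ≤ w then some ((w - left) ^ 2) else none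
  | w :: ws@(_ :: _), left =>
    (PySem.List.pyRange 0 (min w left + 1) 1).foldl
      (fun res p =>
        match bestB ws (left - p) with
        | none => res
        | some sub =>
          match res with
          | none => some ((w - p) ^ 2 + sub)
          | some r => if (w - p) ^ 2 + sub < r then some ((w - p) ^ 2 + sub) else some r)
      none

def solution_alt (n : Int) (works : List Int) : Int :=
  if works.sum ≤ n then 0
  else (bestB works n).getD 0   -- Python B never returns None on Pre_solution

-- ===== PRECONDITION & SPEC =====
-- Pre_solution holds exactly where the Python A returns: otherwise `answer` stays empty and
-- min(answer) raises ValueError (negative n with ≥ 2 works, or a negative work with n below the total).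
def Pre_solution (n : Int) (works : List Int) : Prop :=
  works.sum ≤ n ∨ (0 ≤ n ∧ ∀ w ∈ works, 0 ≤ w) ∨ works.length = 1
instance (n : Int) (works : List Int) : Decidable (Pre_solution n works) := by
  unfold Pre_solution; infer_instance

def pvWitness_solution : Int × List Int := (3, [2, 3])

def Spec_solution (n : Int) (works : List Int) (out : Int) : Prop := out = solution_alt n works
instance (n : Int) (works : List Int) (out : Int) : Decidable (Spec_solution n works out) := by
  unfold Spec_solution; infer_instance

-- ===== CLAIM (what is proved, stated in full; the proofs are below) =====
def Claim_equal_solution : Prop := ∀ (n : Int) (works : List Int),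
  Dom_solution n works → Pre_solution n works → Spec_solution n works (solution n works)

-- ===== LEMMAS AND PROOFS =====

lemma pvW_ge_two (works : List Int) : 2 ≤ pvW works := by
  induction works with
  | nil => simp [pvW]
  | cons w ws ih =>
    have : pvW (w :: ws) = max (w + 2).toNat (pvW ws) := rfl
    omega

lemma pvW_gt (works : List Int) {w : Int} (h : w ∈ works) : (w + 1).toNat < pvW works := by
  induction works with
  | nil => cases h
  | cons a ws ih =>
    have hc : pvW (a :: ws) = max (a + 2).toNat (pvW ws) := rfl
    have h2 := pvW_ge_two ws
    rcases List.mem_cons.mp h with h | h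
    · subst h; omega
    · have := ih h; omega

lemma pvOne_lt (works : List Int) (len : Nat) (hlt : len < works.length) :
    pvW works ^ (works.length - len) < pvW works ^ (works.length + 1 - len) :=
  Nat.pow_lt_pow_right (by have := pvW_ge_two works; omega) (by omega)

lemma pvChildren_lt (works : List Int) (len : Nat) (hlt : len < works.length) (k : Nat)
    (hk : k ≤ (works.getD len 0 + 1).toNat) :
    k * pvW works ^ (works.length - len) < pvW works ^ (works.length + 1 - len) := by
  have hmem : works.getD len 0 ∈ works := by
    rw [List.getD_eq_getElem works 0 hlt]
    exact List.getElem_mem _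
  have hW := pvW_gt works hmem
  have hexp : works.length + 1 - len = (works.length - len) + 1 := by omega
  have hpos : 0 < pvW works ^ (works.length - len) :=
    pow_pos (by have := pvW_ge_two works; omega) _
  rw [hexp, pow_succ, Nat.mul_comm (pvW works ^ (works.length - len)) (pvW works)]
  exact Nat.mul_lt_mul_of_lt_of_le (by omega) (le_refl _) hpos

lemma pvSum_map_const {α : Type} (l : List α) (c : Nat) :
    (l.map (fun _ => c)).sum = l.length * c := by
  induction l with
  | nil => simp
  | cons x t ih => simp only [List.map_cons, List.sum_cons, List.length_cons, ih]; ring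

def pvWeight (works : List Int) (e : List Int) : Nat :=
  pvW works ^ (works.length + 1 - e.length)

lemma pvDecA (works : List Int) (e : List Int) (rest : List (List Int)) :
    (rest.map (pvWeight works)).sum < ((e :: rest).map (pvWeight works)).sum := by
  have : 0 < pvWeight works e := pow_pos (by have := pvW_ge_two works; omega) _
  simp only [List.map_cons, List.sum_cons]
  omega

lemma pvDecB (works : List Int) (e x : List Int) (rest : List (List Int))
    (hx : x.length = e.length + 1) (hlt : e.length < works.length) :
    ((rest ++ [x]).map (pvWeight works)).sum < ((e :: rest).map (pvWeight works)).sum := by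
  have h1 := pvOne_lt works e.length hlt
  have h2 : pvWeight works x = pvW works ^ (works.length - e.length) := by
    rw [pvWeight, hx]; congr 1; omega
  have h3 : pvWeight works e = pvW works ^ (works.length + 1 - e.length) := rfl
  simp only [List.map_append, List.sum_append, List.map_cons, List.sum_cons,
    List.map_nil, List.sum_nil]
  omega

lemma pvCount_le (works : List Int) (len : Nat) (left : Int) :
    (((PySem.List.pyRange 0 (works.getD len 0 + 1) 1).filter
        (fun i => i ≤ left))).length ≤ (works.getD len 0 + 1).toNat := by
  calc _ ≤ (PySem.List.pyRange 0 (works.getD len 0 + 1) 1).length :=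
          List.length_filter_le _ _
    _ = (works.getD len 0 + 1 - 0).toNat := PySem.List.length_pyRange_one _ _
    _ = (works.getD len 0 + 1).toNat := by norm_num

lemma pvDecC (works : List Int) (e : List Int) (rest C : List (List Int))
    (hlen : ∀ x ∈ C, x.length = e.length + 1)
    (hC : C.length ≤ (works.getD e.length 0 + 1).toNat)
    (hlt : e.length < works.length) :
    ((rest ++ C).map (pvWeight works)).sum < ((e :: rest).map (pvWeight works)).sum := by
  have hw : (C.map (pvWeight works)).sum
      = C.length * pvW works ^ (works.length - e.length) := by
    have hmc : C.map (pvWeight works)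
        = C.map (fun _ => pvW works ^ (works.length - e.length)) := by
      apply List.map_congr_left
      intro x hx
      rw [pvWeight, hlen x hx]
      congr 1
      omega
    rw [hmc, pvSum_map_const]
  have hb := pvChildren_lt works e.length hlt C.length hC
  have he : pvWeight works e = pvW works ^ (works.length + 1 - e.length) := rfl
  simp only [List.map_append, List.sum_append, List.map_cons, List.sum_cons]
  omega


-- the multiset of completion costs of a partial plan, by suffix of the work list
def pvVals : List Int → Int → List Int
  | [], left => if left = 0 then [0] else []
  | [w], left => if left ≤ w then [(w - left) ^ 2] else []
  | w :: x :: ws, left =>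
    ((PySem.List.pyRange 0 (w + 1) 1).filter (fun i => i ≤ left)).flatMap
      (fun i => (pvVals (x :: ws) (left - i)).map (fun v => (w - i) ^ 2 + v))

def pvExpand (n : Int) (works : List Int) (e : List Int) : List Int :=
  (pvVals (works.drop e.length) (n - e.sum)).map (fun v => pvCost works e + v)

lemma pvVals_cons (w : Int) (ws : List Int) (h : ws ≠ []) (left : Int) :
    pvVals (w :: ws) left =
      ((PySem.List.pyRange 0 (w + 1) 1).filter (fun i => i ≤ left)).flatMap
        (fun i => (pvVals ws (left - i)).map (fun v => (w - i) ^ 2 + v)) := by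
  cases ws with
  | nil => exact absurd rfl h
  | cons x t => rfl

lemma pvCost_append (works : List Int) (e : List Int) (x : Int)
    (h : e.length < works.length) :
    pvCost works (e ++ [x]) = pvCost works e + (works.getD e.length 0 - x) ^ 2 := by
  induction e generalizing works with
  | nil =>
    cases works with
    | nil => simp at h
    | cons w ws => simp [pvCost]
  | cons a e' ih =>
    cases works with
    | nil => simp at h
    | cons w ws =>
      have h' : e'.length < ws.length := by simp at h; omega
      have ihw := ih ws h'
      simp only [pvCost] at ihw ⊢
      simp only [List.cons_append, List.zip_cons_cons, List.map_cons, List.sum_cons,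
        List.getD_cons_succ, List.length_cons]
      rw [ihw]
      ring

-- ----- running-minimum algebra -----
def pvOMin : Option Int → Option Int → Option Int
  | none, o => o
  | some a, none => some a
  | some a, some b => some (min a b)

def pvMin (l : List Int) : Option Int :=
  l.foldl (fun o x => pvOMin o (some x)) none

lemma pvOMin_assoc (a b c : Option Int) :
    pvOMin (pvOMin a b) c = pvOMin a (pvOMin b c) := by
  cases a <;> cases b <;> cases c <;> simp [pvOMin, min_assoc]

lemma pvOMin_none_right (a : Option Int) : pvOMin a none = a := by
  cases a <;> simp [pvOMin]

lemma foldl_pvOMin (l : List Int) (o : Option Int) :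
    l.foldl (fun o x => pvOMin o (some x)) o = pvOMin o (pvMin l) := by
  induction l generalizing o with
  | nil => simp [pvMin, pvOMin_none_right, List.foldl_nil]
  | cons x t ih =>
    simp only [List.foldl_cons, pvMin]
    rw [ih (pvOMin o (some x)), ih (pvOMin none (some x)), pvOMin_assoc]
    rfl

lemma pvMin_cons (x : Int) (t : List Int) :
    pvMin (x :: t) = pvOMin (some x) (pvMin t) := by
  simp only [pvMin, List.foldl_cons]
  exact foldl_pvOMin t (pvOMin none (some x))

lemma pvMin_append (a b : List Int) :
    pvMin (a ++ b) = pvOMin (pvMin a) (pvMin b) := by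
  simp only [pvMin, List.foldl_append]
  exact foldl_pvOMin b _

lemma pvMin_eq_min? (l : List Int) :
    PySem.List.min? l (fun y => y) = pvMin l := by
  cases l with
  | nil => simp [pvMin, (PySem.List.min?_eq_none_iff [] (fun (y : Int) => y)).mpr rfl]
  | cons x t =>
    rw [PySem.List.min?_id_cons, pvMin_cons]
    induction t generalizing x with
    | nil => rfl
    | cons y t ih =>
      rw [List.foldl_cons, ih (min x y), pvMin_cons, ← pvOMin_assoc]
      rfl

lemma pvMin_perm {l l' : List Int} (h : l.Perm l') : pvMin l = pvMin l' :=
  @List.Perm.foldl_eq _ _ _ _ _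
    ⟨fun o x y => by cases o <;> simp [pvOMin, min_comm, min_left_comm]⟩ h none

lemma pvMin_map_add (c : Int) (l : List Int) :
    pvMin (l.map (fun v => c + v)) = (pvMin l).map (fun v => c + v) := by
  induction l with
  | nil => rfl
  | cons x t ih =>
    rw [List.map_cons, pvMin_cons, pvMin_cons, ih]
    cases pvMin t with
    | none => rfl
    | some a => simp [pvOMin, min_add_add_left]

-- ----- A-side: the queue loop computes (a permutation of) the completion costs -----
lemma loopA_perm (n : Int) (works : List Int) :
    ∀ (fuel : Nat) (queue : List (List Int)) (answer : List Int),
      (∀ e ∈ queue, e.length ≤ works.length) →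
      (queue.map (pvWeight works)).sum ≤ fuel →
      (loopA n works fuel queue answer).Perm
        (answer ++ queue.flatMap (pvExpand n works)) := by
  intro fuel
  induction fuel with
  | zero =>
    intro queue answer hq hm
    cases queue with
    | nil => rw [loopA]; simp
    | cons e rest =>
      exfalso
      have : 0 < pvWeight works e := pow_pos (by have := pvW_ge_two works; omega) _
      simp only [List.map_cons, List.sum_cons] at hm
      omega
  | succ fuel ih =>
    intro queue answer hq hm
    cases queue with
    | nil => rw [loopA]; simp
    | cons e rest =>
      have he := hq e (by simp)
      have hqr : ∀ x ∈ rest, x.length ≤ works.length :=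
        fun x hx => hq x (List.mem_cons_of_mem _ hx)
      simp only [List.map_cons, List.sum_cons] at hm
      by_cases h1 : e.length = works.length
      · by_cases hsum : e.sum = n
        · rw [loopA, if_pos h1, if_pos hsum]
          have hm' : (rest.map (pvWeight works)).sum ≤ fuel := by
            have := pvDecA works e rest
            simp only [List.map_cons, List.sum_cons] at this
            omega
          refine (ih rest (answer ++ [pvCost works e]) hqr hm').trans ?_
          have hee : pvExpand n works e = [pvCost works e] := by
            simp [pvExpand, h1, List.drop_length, pvVals, show n - e.sum = 0 by omega]
          simp [hee, List.append_assoc]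
        · rw [loopA, if_pos h1, if_neg hsum]
          have hm' : (rest.map (pvWeight works)).sum ≤ fuel := by
            have := pvDecA works e rest
            simp only [List.map_cons, List.sum_cons] at this
            omega
          refine (ih rest answer hqr hm').trans ?_
          have hee : pvExpand n works e = [] := by
            simp [pvExpand, h1, List.drop_length, pvVals, show ¬ (n - e.sum = 0) by omega]
          simp [hee]
      · have hlt : e.length < works.length := by omega
        by_cases h2 : e.length = works.length - 1
        · have h2' : e.length + 1 = works.length := by omega
          have hdrop : works.drop e.length = [works.getD e.length 0] := by
            rw [List.drop_eq_getElem_cons hlt, List.getD_eq_getElem works 0 hlt, h2',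
              List.drop_length]
          by_cases h3 : n - e.sum ≤ works.getD e.length 0
          · rw [loopA, if_neg h1, if_pos h2, if_pos h3]
            have hq' : ∀ x ∈ rest ++ [e ++ [n - e.sum]], x.length ≤ works.length := by
              intro x hx
              rcases List.mem_append.mp hx with hx | hx
              · exact hqr x hx
              · simp only [List.mem_singleton] at hx
                subst hx
                simp only [List.length_append, List.length_cons, List.length_nil]
                omega
            have hm' : ((rest ++ [e ++ [n - e.sum]]).map (pvWeight works)).sum ≤ fuel := by
              have := pvDecB works e (e ++ [n - e.sum]) rest (by simp) hlt
              simp only [List.map_cons, List.sum_cons] at this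
              omega
            refine (ih _ answer hq' hm').trans ?_
            have hnew : pvExpand n works (e ++ [n - e.sum])
                = [pvCost works e + (works.getD e.length 0 - (n - e.sum)) ^ 2] := by
              simp only [pvExpand, List.length_append, List.length_cons, List.length_nil,
                List.sum_append, List.sum_cons, List.sum_nil]
              rw [h2', List.drop_length,
                show n - (e.sum + (n - e.sum + 0)) = 0 from by ring]
              simp [pvVals, pvCost_append works e _ hlt]
            have hee : pvExpand n works e
                = [pvCost works e + (works.getD e.length 0 - (n - e.sum)) ^ 2] := by
              rw [pvExpand, hdrop]
              simp only [pvVals]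
              rw [if_pos h3]
              rfl
            apply List.Perm.append_left
            rw [List.flatMap_append, List.flatMap_cons, List.flatMap_cons, List.flatMap_nil,
              List.append_nil, hnew, hee]
            exact List.perm_append_comm
          · rw [loopA, if_neg h1, if_pos h2, if_neg h3]
            have hm' : (rest.map (pvWeight works)).sum ≤ fuel := by
              have := pvDecA works e rest
              simp only [List.map_cons, List.sum_cons] at this
              omega
            refine (ih rest answer hqr hm').trans ?_
            have hee : pvExpand n works e = [] := by
              rw [pvExpand, hdrop]
              simp only [pvVals]
              rw [if_neg h3]
              rfl
            simp [hee]
        · rw [loopA, if_neg h1, if_neg h2]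
          have hlt2 : e.length + 1 < works.length := by omega
          have hdrop : works.drop e.length
              = works.getD e.length 0 :: works.drop (e.length + 1) := by
            rw [List.drop_eq_getElem_cons hlt, List.getD_eq_getElem works 0 hlt]
          have htail : works.drop (e.length + 1) ≠ [] := by
            intro hc
            have := List.drop_eq_nil_iff.mp hc
            omega
          have hq' : ∀ x ∈ rest ++ ((PySem.List.pyRange 0 (works.getD e.length 0 + 1) 1).filter
              (fun i => i ≤ n - e.sum)).map (fun i => e ++ [i]), x.length ≤ works.length := by
            intro x hx
            rcases List.mem_append.mp hx with hx | hx
            · exact hqr x hx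
            · rcases List.mem_map.mp hx with ⟨i, -, h⟩
              rw [← h]
              simp only [List.length_append, List.length_cons, List.length_nil]
              omega
          have hm' : ((rest ++ ((PySem.List.pyRange 0 (works.getD e.length 0 + 1) 1).filter
              (fun i => i ≤ n - e.sum)).map (fun i => e ++ [i])).map (pvWeight works)).sum
              ≤ fuel := by
            have := pvDecC works e rest
              (((PySem.List.pyRange 0 (works.getD e.length 0 + 1) 1).filter
                (fun i => i ≤ n - e.sum)).map (fun i => e ++ [i]))
              (by
                intro x hx
                rcases List.mem_map.mp hx with ⟨i, -, h⟩
                rw [← h]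
                simp)
              (by rw [List.length_map]; exact pvCount_le works e.length (n - e.sum))
              hlt
            simp only [List.map_cons, List.sum_cons] at this
            omega
          refine (ih _ answer hq' hm').trans ?_
          have hexp : pvExpand n works e
              = ((PySem.List.pyRange 0 (works.getD e.length 0 + 1) 1).filter
                  (fun i => i ≤ n - e.sum)).flatMap
                (fun i => (pvVals (works.drop (e.length + 1)) (n - e.sum - i)).map
                  (fun v => pvCost works e + (works.getD e.length 0 - i) ^ 2 + v)) := by
            rw [pvExpand, hdrop, pvVals_cons _ _ htail, List.map_flatMap]
            congr 1
            funext i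
            rw [List.map_map]
            congr 1
            funext v
            simp only [Function.comp]
            ring
          have hchild : ∀ i : Int,
              pvExpand n works (e ++ [i])
              = (pvVals (works.drop (e.length + 1)) (n - e.sum - i)).map
                  (fun v => pvCost works e + (works.getD e.length 0 - i) ^ 2 + v) := by
            intro i
            simp only [pvExpand, List.length_append, List.length_cons, List.length_nil,
              List.sum_append, List.sum_cons, List.sum_nil]
            rw [pvCost_append works e i hlt,
              show n - (e.sum + (i + 0)) = n - e.sum - i from by ring]
          apply List.Perm.append_left
          rw [List.flatMap_append, List.flatMap_cons, hexp, List.flatMap_map]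
          refine List.Perm.trans ?_ List.perm_append_comm
          apply List.Perm.append_left
          refine List.Perm.of_eq ?_
          congr 1
          funext i
          exact hchild i

-- ----- B-side: bestB computes the minimum of the completion costs -----
lemma pvFilter_range (w left : Int) :
    (PySem.List.pyRange 0 (w + 1) 1).filter (fun i => i ≤ left)
      = PySem.List.pyRange 0 (min w left + 1) 1 := by
  rcases le_total w left with h | h
  · rw [min_eq_left h, List.filter_eq_self.mpr]
    intro a ha
    have := PySem.List.mem_pyRange_one.mp ha
    simp only [decide_eq_true_eq]
    omega
  · rw [min_eq_right h]
    by_cases h0 : 0 ≤ left + 1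
    · have hA : (PySem.List.pyRange 0 (left + 1) 1).filter (fun i => i ≤ left)
          = PySem.List.pyRange 0 (left + 1) 1 := by
        apply List.filter_eq_self.mpr
        intro a ha
        have := PySem.List.mem_pyRange_one.mp ha
        simp only [decide_eq_true_eq]
        omega
      have hB : (PySem.List.pyRange (left + 1) (w + 1) 1).filter (fun i => i ≤ left)
          = [] := by
        apply List.filter_eq_nil_iff.mpr
        intro a ha
        have := PySem.List.mem_pyRange_one.mp ha
        simp only [decide_eq_true_eq]
        omega
      rw [PySem.List.pyRange_one_append 0 (left + 1) (w + 1) h0 (by omega),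
        List.filter_append, hA, hB, List.append_nil]
    · rw [PySem.List.pyRange_one_eq_nil (by omega : left + 1 ≤ 0)]
      apply List.filter_eq_nil_iff.mpr
      intro a ha
      have := PySem.List.mem_pyRange_one.mp ha
      simp only [decide_eq_true_eq]
      omega

lemma pvCombine_eq (w left p : Int) (ws : List Int) (o : Option Int) :
    (match bestB ws (left - p) with
      | none => o
      | some sub =>
        match o with
        | none => some ((w - p) ^ 2 + sub)
        | some r => if (w - p) ^ 2 + sub < r then some ((w - p) ^ 2 + sub) else some r)
    = pvOMin o ((bestB ws (left - p)).map (fun v => (w - p) ^ 2 + v)) := by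
  cases bestB ws (left - p) with
  | none => cases o <;> rfl
  | some sub =>
    cases o with
    | none => rfl
    | some r =>
      simp only [Option.map_some, pvOMin]
      rcases lt_or_ge ((w - p) ^ 2 + sub) r with hc | hc
      · rw [if_pos hc, min_eq_right (le_of_lt hc)]
      · rw [if_neg (not_lt.mpr hc), min_eq_left hc]

lemma pvFoldl_bestB (w left x : Int) (ws' : List Int)
    (hih : ∀ l, bestB (x :: ws') l = pvMin (pvVals (x :: ws') l)) (ps : List Int) :
    ∀ o : Option Int,
      ps.foldl (fun res p =>
          match bestB (x :: ws') (left - p) with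
          | none => res
          | some sub =>
            match res with
            | none => some ((w - p) ^ 2 + sub)
            | some r => if (w - p) ^ 2 + sub < r then some ((w - p) ^ 2 + sub) else some r) o
      = pvOMin o (pvMin (ps.flatMap (fun i => (pvVals (x :: ws') (left - i)).map
          (fun v => (w - i) ^ 2 + v)))) := by
  induction ps with
  | nil => intro o; simp [pvMin, pvOMin_none_right]
  | cons p ps ihp =>
    intro o
    rw [List.foldl_cons, ihp, List.flatMap_cons, pvMin_append, ← pvOMin_assoc]
    congr 1
    rw [pvCombine_eq, hih (left - p), pvMin_map_add]

lemma bestB_eq (ws : List Int) : ∀ left : Int, ws ≠ [] → bestB ws left = pvMin (pvVals ws left) := by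
  induction ws with
  | nil => intro left h; exact absurd rfl h
  | cons w ws ih =>
    intro left _
    cases ws with
    | nil =>
      simp only [bestB, pvVals]
      split_ifs <;> rfl
    | cons x ws' =>
      rw [bestB]
      rw [pvFoldl_bestB w left x ws' (fun l => ih l (by simp)),
        pvVals_cons _ _ (by simp), pvFilter_range]
      rfl

theorem solution_spec : Claim_equal_solution := by
  intro n works hdom hpre
  unfold Spec_solution solution solution_alt
  by_cases hs : works.sum ≤ n
  · rw [if_pos hs, if_pos hs]
  · rw [if_neg hs, if_neg hs]
    have hperm := loopA_perm n works (pvW works ^ (works.length + 1)) [[]] []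
      (by intro e he; simp at he; simp [he])
      (by simp [pvWeight])
    have hexp0 : pvExpand n works ([] : List Int) = pvVals works n := by
      simp [pvExpand, pvCost]
    rw [pvMin_eq_min?, pvMin_perm hperm]
    simp only [List.flatMap_cons, List.flatMap_nil, List.append_nil, List.nil_append, hexp0]
    cases works with
    | nil =>
      have hn : n < 0 := by simp at hs; omega
      rw [show pvVals [] n = [] from by simp [pvVals]; omega]
      simp [pvMin, bestB]
    | cons w ws => rw [bestB_eq (w :: ws) n (by simp)]
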